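-- pv_equiv track=rewrite | github.com/whatasame/BaekjoonHub | 백준/Gold/22861. 폴더 정리 （large）/폴더 정리 （large）.py | solution
-- ===== SOURCE A (Python) =====
-- from collections import defaultdict
--
-- def solution(info, commands, queries):
--     # 폴더 데이터 초기화
--     folders = defaultdict(dict)
--     for p, q, f in info:
--         folders[p][q] = f
--
--     # 폴더 병합
--     for victim, target in commands:
--         victim, target = victim.split("/")[-1], target.split("/")[-1]
--         folders[target].update(folders[victim])
--         folders.pop(victim)
--
--     # 쿼리 실행
--     answer = []
--     for query in queries:
--         target = query.split("/")[-1]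
--         result = examine(folders, target)
--         answer.append((len(set(result)), len(result)))
--
--     return answer
--
-- def examine(folders, target):
--     files = []
--     for q, f in folders[target].items():
--         if f == "1":
--             files.extend(examine(folders, q))
--         else:
--             files.append(q)
--
--     return files
-- ===== SOURCE B (Python) =====
-- def solution(info, commands, queries):
--     children = {}
--     for p, q, f in info:
--         children.setdefault(p, {})[q] = f
--
--     for victim, target in commands:
--         v = victim.split("/")[-1]
--         t = target.split("/")[-1]
--         dst = children.setdefault(t, {})
--         dst.update(children.get(v, {}))
--         children.pop(v, None)
--
--     out = []
--     for query in queries: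
--         seen = set()
--         total = 0
--         # iterative DFS with an explicit stack of frames; a frame holds the
--         # children still to process, reversed so pop() yields insertion order
--         stack = [list(reversed(children.get(query.split("/")[-1], {}).items()))]
--         while stack:
--             frame = stack[-1]
--             if not frame:
--                 stack.pop()
--                 continue
--             name, flag = frame.pop()
--             if flag == "1":
--                 stack.append(list(reversed(children.get(name, {}).items())))
--             else:
--                 seen.add(name)
--                 total += 1
--         out.append((len(seen), total))
--     return out
-- ===== Notes on version B (the rewrite author's own statement) =====
-- stated objective: alternative
-- what changed: B replaces A's recursive examine, which materialises the full multiset of file names per query and post-processes it with set()/len(), by an iterative depth-first walk over an explicit stack of frames that accumulates the distinct-name set and the running total directly, never building the file list.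
import Mathlib
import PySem

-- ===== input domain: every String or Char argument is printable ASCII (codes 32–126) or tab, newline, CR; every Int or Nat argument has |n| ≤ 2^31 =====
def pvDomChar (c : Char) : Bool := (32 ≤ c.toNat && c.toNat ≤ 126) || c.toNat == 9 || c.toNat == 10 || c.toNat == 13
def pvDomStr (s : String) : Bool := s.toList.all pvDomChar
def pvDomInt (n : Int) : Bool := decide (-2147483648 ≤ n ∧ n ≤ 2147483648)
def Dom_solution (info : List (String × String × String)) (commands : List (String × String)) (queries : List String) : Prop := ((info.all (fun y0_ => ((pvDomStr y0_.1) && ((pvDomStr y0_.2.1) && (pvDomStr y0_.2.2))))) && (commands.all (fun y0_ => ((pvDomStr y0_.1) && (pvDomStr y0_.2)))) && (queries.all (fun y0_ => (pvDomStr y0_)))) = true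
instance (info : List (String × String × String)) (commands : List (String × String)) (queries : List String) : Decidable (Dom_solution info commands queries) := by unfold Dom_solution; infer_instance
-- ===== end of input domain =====

-- B replaces A's recursive examine (which materialises the full multiset of file names
-- per query and post-processes it with set()/len()) by an iterative depth-first walk
-- over an explicit stack of frames that accumulates the distinct-name set and the
-- running total directly (objective: alternative; no asymptotic change).

-- ===== PORT A =====

-- s.split("/")[-1]: "/" ≠ "" so split? is always `some` and the list is never empty,
-- hence the defaults are never used.
def pvLastA (s : String) : String := ((PySem.Str.split? s "/").getD []).getLastD ""

-- folders = defaultdict(dict); for p,q,f in info: folders[p][q] = f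
def pvTableA (info : List (String × String × String)) : PySem.Dict String (PySem.Dict String String) :=
  info.foldl (fun T pqf => T.insert pqf.1 ((T.getD pqf.1 PySem.Dict.empty).insert pqf.2.1 pqf.2.2)) PySem.Dict.empty

-- for victim,target in commands: folders[target].update(folders[victim]); folders.pop(victim)
-- (the defaultdict read folders[victim] inserts an empty entry that the pop removes again,
-- so net content is update-then-erase; outer insertion order is never observed).
def pvMergeA (T0 : PySem.Dict String (PySem.Dict String String)) (commands : List (String × String)) : PySem.Dict String (PySem.Dict String String) :=
  commands.foldl (fun T vt =>
    let v := pvLastA vt.1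
    let t := pvLastA vt.2
    ((T.insert t ((T.getD t PySem.Dict.empty).update (T.getD v PySem.Dict.empty).items)).erase v)) T0

-- examine: recursive list building. Python has no fuel; the fuel T.size + 2 bounds the
-- recursion depth, which on Pre_ (no queried folder reaches a cycle) never runs out:
-- a cycle-free chain of folder keys has at most T.size + 1 nodes.
mutual
def pvExamine (T : PySem.Dict String (PySem.Dict String String)) : Nat → String → List String
  | 0, _ => []
  | f+1, target => pvExamineItems T f ((T.getD target PySem.Dict.empty).items)
  termination_by f _ => (f, 0)
def pvExamineItems (T : PySem.Dict String (PySem.Dict String String)) : Nat → List (String × String) → List String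
  | _, [] => []
  | f, qf :: rest => (if qf.2 == "1" then pvExamine T f qf.1 else [qf.1]) ++ pvExamineItems T f rest
  termination_by f l => (f, l.length + 1)
end

def solution (info : List (String × String × String)) (commands : List (String × String)) (queries : List String) : List (Int × Int) :=
  let folders := pvMergeA (pvTableA info) commands
  let fuel := folders.size + 2
  queries.foldl (fun answer query =>
    let result := pvExamine folders fuel (pvLastA query)
    answer ++ [(((PySem.Set.ofList result).length : Int), (result.length : Int))]) []

-- ===== PORT B =====

def pvLastB (s : String) : String := ((PySem.Str.split? s "/").getD []).getLastD ""

-- children = {}; for p,q,f in info: children.setdefault(p, {})[q] = f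
def pvTableB (info : List (String × String × String)) : PySem.Dict String (PySem.Dict String String) :=
  info.foldl (fun T pqf => T.insert pqf.1 ((T.getD pqf.1 PySem.Dict.empty).insert pqf.2.1 pqf.2.2)) PySem.Dict.empty

-- dst = children.setdefault(t, {}); dst.update(children.get(v, {})); children.pop(v, None)
def pvMergeB (T0 : PySem.Dict String (PySem.Dict String String)) (commands : List (String × String)) : PySem.Dict String (PySem.Dict String String) :=
  commands.foldl (fun T vt =>
    let v := pvLastB vt.1
    let t := pvLastB vt.2
    ((T.insert t ((T.getD t PySem.Dict.empty).update (T.getD v PySem.Dict.empty).items)).erase v)) T0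

-- bound on the number of children of any folder; used only by the termination measure
def pvMaxW (T : PySem.Dict String (PySem.Dict String String)) : Nat :=
  (T.items.map (fun p => p.2.items.length)).foldl max 0

-- termination helper for pvStack (cited by its decreasing_by)
theorem pv_items_le_maxW (T : PySem.Dict String (PySem.Dict String String)) (q : String) :
    ((T.getD q PySem.Dict.empty).items).length ≤ pvMaxW T := by
  rw [PySem.Dict.getD_eq_get?_getD]
  cases h : T.get? q with
  | none => simp [PySem.Dict.empty]
  | some v =>
    have hm : (q, v) ∈ T.items := PySem.Dict.mem_items_of_get?_eq_some T h
    have : v.items.length ∈ T.items.map (fun p => p.2.items.length) :=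
      List.mem_map.mpr ⟨(q, v), hm, rfl⟩
    exact (PySem.List.le_foldl_max _ _).2 _ this

-- the while loop over the explicit stack of frames. Python stores each frame reversed
-- and pops from the END, so children are consumed in insertion order: a frame here is
-- the list of NOT-YET-PROCESSED children in insertion order, consumed from the head.
-- Python has no fuel; each frame carries a depth budget (a totality guard only).
def pvStack (T : PySem.Dict String (PySem.Dict String String)) :
    List (Nat × List (String × String)) → PySem.Set String → Int → PySem.Set String × Int
  | [], seen, total => (seen, total)
  | (g, []) :: rest, seen, total => pvStack T rest seen total
  | (f, qf :: tl) :: rest, seen, total =>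
    if qf.2 == "1" then
      if f = 0 then pvStack T ((f, tl) :: rest) seen total
      else pvStack T ((f - 1, (T.getD qf.1 PySem.Dict.empty).items) :: (f, tl) :: rest) seen total
    else pvStack T ((f, tl) :: rest) (PySem.Set.add seen qf.1) (total + 1)
  termination_by stack _ _ => (stack.map (fun p => (p.2.length + 1) * (pvMaxW T + 2) ^ p.1)).sum
  decreasing_by
  all_goals simp only [List.map_cons, List.sum_cons, List.length_cons, List.length_nil]
  all_goals first
    | (have h2 := pv_items_le_maxW T qf.1
       have h1 : 0 < (pvMaxW T + 2) ^ (f - 1) := pow_pos (by omega) (f - 1)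
       have h3 : (pvMaxW T + 2) ^ f = (pvMaxW T + 2) ^ (f - 1) * (pvMaxW T + 2) := by
         rw [← pow_succ]; congr 1; omega
       nlinarith [h1, h2, h3])
    | nlinarith [pow_pos (show 0 < pvMaxW T + 2 by omega) f]
    | nlinarith [pow_pos (show 0 < pvMaxW T + 2 by omega) g]

def solution_alt (info : List (String × String × String)) (commands : List (String × String)) (queries : List String) : List (Int × Int) :=
  let children := pvMergeB (pvTableB info) commands
  queries.map (fun query =>
    let r := pvStack children [(children.size + 1, (children.getD (pvLastB query) PySem.Dict.empty).items)] PySem.Set.empty 0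
    ((r.1.length : Int), r.2))

-- ===== PRECONDITION & SPEC =====

-- Pre_ helpers: an independent replay of the (trivial) table construction, and bounded
-- reachability over the "is a sub-folder of" edges, used only to state acyclicity.
def pvPreTable (info : List (String × String × String)) (commands : List (String × String)) : PySem.Dict String (PySem.Dict String String) :=
  (commands.foldl (fun T vt =>
      let v := ((PySem.Str.split? vt.1 "/").getD []).getLastD ""
      let t := ((PySem.Str.split? vt.2 "/").getD []).getLastD ""
      ((T.insert t ((T.getD t PySem.Dict.empty).update (T.getD v PySem.Dict.empty).items)).erase v))
    (info.foldl (fun T pqf => T.insert pqf.1 ((T.getD pqf.1 PySem.Dict.empty).insert pqf.2.1 pqf.2.2)) PySem.Dict.empty))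

def pvEdges (T : PySem.Dict String (PySem.Dict String String)) (n : String) : List String :=
  (((T.getD n PySem.Dict.empty).items.filter (fun p => p.2 == "1")).map (fun p => p.1))

def pvReachStep (T : PySem.Dict String (PySem.Dict String String)) (R : PySem.Set String) : PySem.Set String :=
  PySem.Set.update R (R.flatMap (pvEdges T))

-- nodes reachable from n through at least one sub-folder edge (saturation: a cycle-free
-- path through the ≤ T.size folder keys has at most T.size + 1 nodes)
def pvReachPlus (T : PySem.Dict String (PySem.Dict String String)) (n : String) : PySem.Set String :=
  Nat.rec (PySem.Set.ofList (pvEdges T n)) (fun _ R => pvReachStep T R) (T.size + 2)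

-- Pre_ excludes exactly the inputs on which A's recursive examine never terminates
-- (Python raises RecursionError): some folder reachable from a queried target lies on a cycle.
def Pre_solution (info : List (String × String × String)) (commands : List (String × String)) (queries : List String) : Prop :=
  ∀ q ∈ queries,
    let s := ((PySem.Str.split? q "/").getD []).getLastD ""
    ∀ n ∈ (s :: pvReachPlus (pvPreTable info commands) s), n ∉ pvReachPlus (pvPreTable info commands) n
instance (info : List (String × String × String)) (commands : List (String × String)) (queries : List String) : Decidable (Pre_solution info commands queries) := by unfold Pre_solution; infer_instance

def pvWitness_solution : (List (String × String × String)) × (List (String × String)) × List String :=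
  ([("root", "sub", "1"), ("root", "a.txt", "0"), ("sub", "b.txt", "0"), ("tmp", "c.txt", "0")],
   [("tmp", "root")],
   ["root", "sub"])

def Spec_solution (info : List (String × String × String)) (commands : List (String × String)) (queries : List String) (out : List (Int × Int)) : Prop := out = solution_alt info commands queries
instance (info : List (String × String × String)) (commands : List (String × String)) (queries : List String) (out : List (Int × Int)) : Decidable (Spec_solution info commands queries out) := by unfold Spec_solution; infer_instance

-- ===== CLAIM (what is proved, stated in full; the proofs are below) =====
def Claim_equal_solution : Prop := ∀ (info : List (String × String × String)) (commands : List (String × String)) (queries : List String), Dom_solution info commands queries → Pre_solution info commands queries → Spec_solution info commands queries (solution info commands queries)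

-- ===== LEMMAS AND PROOFS =====

-- the loop invariant: running the stack with one more frame (f, items) on top first
-- consumes that frame, contributing exactly the set and the length of the file list
-- A's pvExamineItems produces from the same children, then continues with the rest.
theorem pv_stack_run (T : PySem.Dict String (PySem.Dict String String)) :
    ∀ (f : Nat) (items : List (String × String)) (rest : List (Nat × List (String × String)))
      (seen : PySem.Set String) (total : Int),
      pvStack T ((f, items) :: rest) seen total
        = pvStack T rest (PySem.Set.update seen (pvExamineItems T f items))
            (total + ((pvExamineItems T f items).length : Int)) := by
  intro f
  induction f with
  | zero =>
    intro items
    induction items with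
    | nil =>
      intro rest seen total
      simp [pvStack, pvExamineItems, PySem.Set.update_nil]
    | cons qf tl ih =>
      intro rest seen total
      by_cases h : (qf.2 == "1") = true
      · rw [pvStack, if_pos h, if_pos rfl, ih]
        have he : pvExamineItems T 0 (qf :: tl) = pvExamineItems T 0 tl := by
          rw [pvExamineItems, if_pos h, pvExamine]; simp
        rw [he]
      · rw [pvStack, if_neg h, ih]
        have he : pvExamineItems T 0 (qf :: tl) = [qf.1] ++ pvExamineItems T 0 tl := by
          rw [pvExamineItems, if_neg h]
        rw [he, List.singleton_append, PySem.Set.update_cons]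
        congr 1
        push_cast [List.length_cons]
        ring
  | succ f' ihf =>
    intro items
    induction items with
    | nil =>
      intro rest seen total
      simp [pvStack, pvExamineItems, PySem.Set.update_nil]
    | cons qf tl ih =>
      intro rest seen total
      by_cases h : (qf.2 == "1") = true
      · rw [pvStack, if_pos h, if_neg (Nat.succ_ne_zero f'), Nat.succ_sub_one, ihf, ih]
        have he : pvExamineItems T (f' + 1) (qf :: tl)
            = pvExamineItems T f' ((T.getD qf.1 PySem.Dict.empty).items) ++ pvExamineItems T (f' + 1) tl := by
          rw [pvExamineItems, if_pos h, pvExamine]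
        rw [he, PySem.Set.update_append]
        congr 1
        push_cast [List.length_append]
        ring
      · rw [pvStack, if_neg h, ih]
        have he : pvExamineItems T (f' + 1) (qf :: tl) = [qf.1] ++ pvExamineItems T (f' + 1) tl := by
          rw [pvExamineItems, if_neg h]
        rw [he, List.singleton_append, PySem.Set.update_cons]
        congr 1
        push_cast [List.length_cons]
        ring

-- B's per-query stack run equals A's per-query materialise-then-measure value
theorem pv_stack_query (T : PySem.Dict String (PySem.Dict String String)) (t : String) :
    pvStack T [(T.size + 1, (T.getD t PySem.Dict.empty).items)] PySem.Set.empty 0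
      = (PySem.Set.ofList (pvExamine T (T.size + 2) t), ((pvExamine T (T.size + 2) t).length : Int)) := by
  have he : pvExamine T (T.size + 2) t = pvExamineItems T (T.size + 1) ((T.getD t PySem.Dict.empty).items) := by
    have h2 : T.size + 2 = (T.size + 1) + 1 := rfl
    rw [h2, pvExamine]
  rw [pv_stack_run, pvStack, he, PySem.Set.update_empty]
  congr 1
  ring

theorem solution_eq_alt (info : List (String × String × String)) (commands : List (String × String)) (queries : List String) :
    solution info commands queries = solution_alt info commands queries := by
  unfold solution solution_alt
  have htab : pvMergeB (pvTableB info) commands = pvMergeA (pvTableA info) commands := rfl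
  have hlast : pvLastB = pvLastA := rfl
  rw [htab, hlast]
  rw [PySem.List.foldl_append_singleton_eq_map
    (f := fun query => (((PySem.Set.ofList (pvExamine (pvMergeA (pvTableA info) commands) ((pvMergeA (pvTableA info) commands).size + 2) (pvLastA query))).length : Int), ((pvExamine (pvMergeA (pvTableA info) commands) ((pvMergeA (pvTableA info) commands).size + 2) (pvLastA query)).length : Int)))]
  simp only [List.nil_append]
  apply List.map_congr_left
  intro q _
  rw [pv_stack_query (pvMergeA (pvTableA info) commands) (pvLastA q)]

-- ===== VERDICT (by name: the statement is the Claim_ definition above) =====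
theorem solution_spec : Claim_equal_solution := by
  intro info commands queries _ _
  unfold Spec_solution
  exact solution_eq_alt info commands queries
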